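-- pv_equiv track=rewrite | github.com/Satniuq/DoReal | 16_validacao_integral/scripts/gerar_matriz_confronto_filosofico_v1.py | infer_veredito
-- ===== SOURCE A (Python) =====
-- from typing import Any, Dict, Iterable, List, Optional, Sequence, Set, Tuple
--
-- def safe_list(value: Any) -> List[Any]:
--     if value is None:
--         return []
--     if isinstance(value, list):
--         return value
--     return [value]
--
-- def unique_preserve(values: Iterable[str]) -> List[str]:
--     out: List[str] = []
--     seen: Set[str] = set()
--     for v in values:
--         if not isinstance(v, str):
--             continue
--         vv = v.strip()
--         if not vv or vv in seen:
--             continue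
--         seen.add(vv)
--         out.append(vv)
--     return out
--
-- def infer_veredito(problem: Dict[str, Any]) -> List[str]:
--     veredito: List[str] = []
--     tensoes = set(str(x) for x in safe_list(problem.get("tipo_de_tensao_com_o_sistema")))
--     if "compatibilidade_forte" in tensoes:
--         veredito.append("preservar")
--     if "compatibilidade_parcial" in tensoes or "tensao_produtiva" in tensoes:
--         veredito.append("integrar")
--     if "tensao_forte" in tensoes:
--         veredito.append("reformular")
--     if "incompatibilidade_restrita" in tensoes or "incompatibilidade_forte" in tensoes:
--         veredito.append("restringir")
--         veredito.append("criticar")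
--     if not veredito:
--         veredito.append("deixar_em_aberto")
--     return unique_preserve(veredito)
-- ===== SOURCE B (Python) =====
-- TAG_LABELS = {
--     "compatibilidade_forte": ["preservar"],
--     "compatibilidade_parcial": ["integrar"],
--     "tensao_produtiva": ["integrar"],
--     "tensao_forte": ["reformular"],
--     "incompatibilidade_restrita": ["restringir", "criticar"],
--     "incompatibilidade_forte": ["restringir", "criticar"],
-- }
--
-- ORDER = ["preservar", "integrar", "reformular", "restringir", "criticar"]
--
-- def infer_veredito(problem):
--     # Single pass over the input tags: each tag contributes its labels to a set;
--     # the output is the canonical label order filtered by that set.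
--     triggered = set()
--     for x in problem.get("tipo_de_tensao_com_o_sistema") or []:
--         triggered.update(TAG_LABELS.get(str(x), []))
--     out = [lab for lab in ORDER if lab in triggered]
--     return out or ["deixar_em_aberto"]
-- ===== Notes on version B (the rewrite author's own statement) =====
-- stated objective: simpler
-- what changed: Inverts the traversal: instead of building a tag set and testing it in four if/append blocks followed by a dedup pass, B makes one pass over the input tags accumulating a set of triggered labels via a tag-to-labels map, then emits the fixed canonical label order filtered by that set; correct because A's appends always produce a duplicate-free subsequence of that canonical order.
import Mathlib
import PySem

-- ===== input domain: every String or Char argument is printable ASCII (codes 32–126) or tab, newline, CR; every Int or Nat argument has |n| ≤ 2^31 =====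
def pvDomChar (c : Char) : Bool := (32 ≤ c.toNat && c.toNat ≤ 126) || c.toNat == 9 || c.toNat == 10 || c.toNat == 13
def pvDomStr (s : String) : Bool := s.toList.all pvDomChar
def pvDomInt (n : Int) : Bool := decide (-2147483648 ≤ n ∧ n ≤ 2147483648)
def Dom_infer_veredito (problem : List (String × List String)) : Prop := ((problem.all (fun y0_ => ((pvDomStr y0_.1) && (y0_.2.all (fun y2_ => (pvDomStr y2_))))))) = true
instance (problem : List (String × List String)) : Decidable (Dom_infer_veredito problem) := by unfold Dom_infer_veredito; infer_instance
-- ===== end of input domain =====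

-- B inverts the traversal: one pass over the input tags accumulating a set of triggered labels
-- via a tag→labels map, then the fixed canonical label order filtered by that set (simpler);
-- same return value everywhere.

-- ===== PORT A =====
-- safe_list: value is Option (List String) under the type convention; None → [], a list → itself
def pvSafeList (v : Option (List String)) : List String :=
  match v with
  | none => []
  | some xs => xs

-- unique_preserve: every element is a str here, so the isinstance skip never fires
def pvUniquePreserve (values : List String) : List String :=
  (values.foldl (fun (st : List String × PySem.Set String) v =>
      let vv := PySem.Str.strip v
      if vv = "" ∨ st.2.contains vv then st
      else (st.1 ++ [vv], st.2.add vv)) ([], PySem.Set.empty)).1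

def infer_veredito (problem : List (String × List String)) : List String :=
  let veredito : List String := []
  -- str(x) is the identity on strings, so the 'str(x) for x in' map is 'fun x => x'
  let tensoes : PySem.Set String :=
    PySem.Set.ofList ((pvSafeList ((PySem.Dict.mk problem).get? "tipo_de_tensao_com_o_sistema")).map (fun x => x))
  let veredito := if tensoes.contains "compatibilidade_forte" then veredito ++ ["preservar"] else veredito
  let veredito := if tensoes.contains "compatibilidade_parcial" || tensoes.contains "tensao_produtiva" then veredito ++ ["integrar"] else veredito
  let veredito := if tensoes.contains "tensao_forte" then veredito ++ ["reformular"] else veredito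
  let veredito := if tensoes.contains "incompatibilidade_restrita" || tensoes.contains "incompatibilidade_forte" then veredito ++ ["restringir"] ++ ["criticar"] else veredito
  let veredito := if veredito = [] then veredito ++ ["deixar_em_aberto"] else veredito
  pvUniquePreserve veredito

-- ===== PORT B =====
-- TAG_LABELS: which labels each individual tag triggers
def pvTagLabels : PySem.Dict String (List String) :=
  PySem.Dict.mk
    [("compatibilidade_forte", ["preservar"]),
     ("compatibilidade_parcial", ["integrar"]),
     ("tensao_produtiva", ["integrar"]),
     ("tensao_forte", ["reformular"]),
     ("incompatibilidade_restrita", ["restringir", "criticar"]),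
     ("incompatibilidade_forte", ["restringir", "criticar"])]

-- TAG_LABELS.get(x, [])
def pvLabelsOf (x : String) : List String := (pvTagLabels.get? x).getD []

-- ORDER: the canonical emission order of the labels
def pvOrder : List String := ["preservar", "integrar", "reformular", "restringir", "criticar"]

def infer_veredito_alt (problem : List (String × List String)) : List String :=
  -- problem.get(k) or []; str(x) is the identity on strings
  let tags := ((PySem.Dict.mk problem).get? "tipo_de_tensao_com_o_sistema").getD []
  -- for x in tags: triggered.update(TAG_LABELS.get(str(x), []))
  let triggered := tags.foldl (fun s x => PySem.Set.update s (pvLabelsOf x)) PySem.Set.empty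
  -- [lab for lab in ORDER if lab in triggered]
  let out := pvOrder.filter (fun lab => triggered.contains lab)
  if out = [] then ["deixar_em_aberto"] else out

-- ===== PRECONDITION & SPEC =====
def Spec_infer_veredito (problem : List (String × List String)) (out : List String) : Prop := out = infer_veredito_alt problem
instance (problem : List (String × List String)) (out : List String) : Decidable (Spec_infer_veredito problem out) := by unfold Spec_infer_veredito; infer_instance

-- ===== CLAIM (what is proved, stated in full; the proofs are below) =====
def Claim_equal_infer_veredito : Prop := ∀ (problem : List (String × List String)), Dom_infer_veredito problem → Spec_infer_veredito problem (infer_veredito problem)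

-- ===== LEMMAS AND PROOFS =====

-- A's safe_list and B's 'or []' agree on Option (List String)
lemma safeList_eq_getD (v : Option (List String)) : pvSafeList v = v.getD [] := by
  cases v <;> rfl

-- membership in B's accumulated label set, as a boolean over the tag list
lemma contains_foldl_update (xs : List String) (s0 : PySem.Set String) (lab : String) :
    (xs.foldl (fun s x => PySem.Set.update s (pvLabelsOf x)) s0).contains lab
      = (s0.contains lab || xs.any (fun x => (pvLabelsOf x).contains lab)) := by
  induction xs generalizing s0 with
  | nil => simp
  | cons x xs ih =>
    simp only [List.foldl_cons, List.any_cons, ih]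
    apply Bool.eq_iff_iff.mpr
    constructor <;> intro h <;>
      simp only [Bool.or_eq_true, PySem.Set.contains_iff, PySem.Set.mem_update,
        List.contains_iff_mem] at * <;> tauto

-- a key not equal to x fails the == test in the lookup
lemma pvBeqFalse {x k : String} (h : ¬ x = k) : (k == x) = false := by
  simp [Ne.symm h]

-- the tag→labels lookup as a plain conditional
lemma labelsOf_eq (x : String) : pvLabelsOf x =
    (if x = "compatibilidade_forte" then ["preservar"]
     else if x = "compatibilidade_parcial" then ["integrar"]
     else if x = "tensao_produtiva" then ["integrar"]
     else if x = "tensao_forte" then ["reformular"]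
     else if x = "incompatibilidade_restrita" then ["restringir", "criticar"]
     else if x = "incompatibilidade_forte" then ["restringir", "criticar"]
     else []) := by
  unfold pvLabelsOf pvTagLabels
  split_ifs <;> simp_all [PySem.Dict.get?, List.find?, pvBeqFalse]

-- per-label characterisation of the lookup
lemma labelsOf_preservar (x : String) :
    (pvLabelsOf x).contains "preservar" = (x == "compatibilidade_forte") := by
  rw [labelsOf_eq]; split_ifs <;> simp_all

lemma labelsOf_integrar (x : String) :
    (pvLabelsOf x).contains "integrar" = (x == "compatibilidade_parcial" || x == "tensao_produtiva") := by
  rw [labelsOf_eq]; split_ifs <;> simp_all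

lemma labelsOf_reformular (x : String) :
    (pvLabelsOf x).contains "reformular" = (x == "tensao_forte") := by
  rw [labelsOf_eq]; split_ifs <;> simp_all

lemma labelsOf_restringir (x : String) :
    (pvLabelsOf x).contains "restringir" = (x == "incompatibilidade_restrita" || x == "incompatibilidade_forte") := by
  rw [labelsOf_eq]; split_ifs <;> simp_all

lemma labelsOf_criticar (x : String) :
    (pvLabelsOf x).contains "criticar" = (x == "incompatibilidade_restrita" || x == "incompatibilidade_forte") := by
  rw [labelsOf_eq]; split_ifs <;> simp_all

-- any (· == k) is membership of k
lemma any_beq_eq_contains (xs : List String) (k : String) :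
    (xs.any (fun x => x == k)) = xs.contains k := by
  apply Bool.eq_iff_iff.mpr
  simp only [List.any_eq_true, beq_iff_eq, List.contains_iff_mem]
  constructor
  · rintro ⟨x, hx, rfl⟩; exact hx
  · intro h; exact ⟨k, h, rfl⟩

-- any (· == k1 ∨ · == k2) is membership of either
lemma any_beq2_eq_contains (xs : List String) (k1 k2 : String) :
    (xs.any (fun x => x == k1 || x == k2)) = (xs.contains k1 || xs.contains k2) := by
  apply Bool.eq_iff_iff.mpr
  simp only [List.any_eq_true, Bool.or_eq_true, beq_iff_eq, List.contains_iff_mem]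
  constructor
  · rintro ⟨x, hx, rfl | rfl⟩
    · exact Or.inl hx
    · exact Or.inr hx
  · rintro (h | h)
    · exact ⟨k1, h, Or.inl rfl⟩
    · exact ⟨k2, h, Or.inr rfl⟩

-- A's tag set membership is list membership
lemma ofList_contains (xs : List String) (t : String) :
    (PySem.Set.ofList xs).contains t = xs.contains t := by
  apply Bool.eq_iff_iff.mpr
  simp [PySem.Set.mem_ofList]

-- ===== VERDICT (by name: the statement is the Claim_ definition above) =====
theorem infer_veredito_spec : Claim_equal_infer_veredito := by
  intro problem _
  unfold Spec_infer_veredito infer_veredito infer_veredito_alt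
  rw [safeList_eq_getD]
  generalize ((PySem.Dict.mk problem).get? "tipo_de_tensao_com_o_sistema").getD [] = xs
  simp only [List.map_id_fun', id, pvOrder, List.filter_cons, List.filter_nil,
    contains_foldl_update, labelsOf_preservar, labelsOf_integrar, labelsOf_reformular,
    labelsOf_restringir, labelsOf_criticar, any_beq_eq_contains, any_beq2_eq_contains,
    ofList_contains]
  generalize xs.contains "compatibilidade_forte" = b1
  generalize xs.contains "compatibilidade_parcial" = b2
  generalize xs.contains "tensao_produtiva" = b3
  generalize xs.contains "tensao_forte" = b4
  generalize xs.contains "incompatibilidade_restrita" = b5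
  generalize xs.contains "incompatibilidade_forte" = b6
  revert b1 b2 b3 b4 b5 b6
  decide
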